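-- pv_equiv track=rewrite | github.com/yushika-j/MyWorkspace | lab7-students/lab7.py | subsetSum
-- ===== SOURCE A (Python) =====
-- def subsetSum(lst,n):
--     num1 = 0
--     num2 = 0
--     num3 = 0
--     for i in range(0,len(lst)):
--         for j in range(0,len(lst)):
--                 for k in range(0,len(lst)):
--                     num1 = lst[i]
--                     num2 = lst[j]
--                     num3= lst[k]
--                     if num1 + num2 + num3 == n:
--                         return True
--     return False
-- ===== SOURCE B (Python) =====
-- def subsetSum(lst, n):
--     pair_sums = {a + b for a in lst for b in lst}
--     return any(n - c in pair_sums for c in lst)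
-- ===== Notes on version B (the rewrite author's own statement) =====
-- stated objective: faster
-- what changed: Replaces the triple nested index loop with a precomputed set of all pairwise sums followed by a single membership pass checking n - c for each element.
import Mathlib
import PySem

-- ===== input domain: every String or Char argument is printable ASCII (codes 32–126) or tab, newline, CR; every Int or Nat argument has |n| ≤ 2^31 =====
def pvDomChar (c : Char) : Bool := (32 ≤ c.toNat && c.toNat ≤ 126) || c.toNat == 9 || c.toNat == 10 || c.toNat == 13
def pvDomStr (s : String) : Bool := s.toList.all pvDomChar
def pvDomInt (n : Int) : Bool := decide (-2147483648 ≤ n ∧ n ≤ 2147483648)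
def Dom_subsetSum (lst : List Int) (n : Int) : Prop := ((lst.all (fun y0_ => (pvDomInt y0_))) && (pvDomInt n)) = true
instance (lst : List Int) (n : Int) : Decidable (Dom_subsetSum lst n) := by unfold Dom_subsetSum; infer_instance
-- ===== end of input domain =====

-- B replaces A's O(n^3) triple index loop by a set of all pairwise sums plus one membership pass (O(n^2)).

-- ===== PORT A =====
-- literal port of the triple nested loop over range(0, len(lst)) with early return
def subsetSum (lst : List Int) (n : Int) : Bool :=
  (PySem.List.pyRange 0 lst.length 1).any fun i =>
    (PySem.List.pyRange 0 lst.length 1).any fun j =>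
      (PySem.List.pyRange 0 lst.length 1).any fun k =>
        PySem.List.pyGetD lst i 0 + PySem.List.pyGetD lst j 0 + PySem.List.pyGetD lst k 0 == n

-- ===== PORT B =====
def subsetSum_alt (lst : List Int) (n : Int) : Bool :=
  let pairSums : PySem.Set Int :=
    PySem.Set.ofList (lst.flatMap fun a => lst.map fun b => a + b)
  lst.any fun c => PySem.Set.contains pairSums (n - c)

-- ===== PRECONDITION & SPEC =====
def Spec_subsetSum (lst : List Int) (n : Int) (out : Bool) : Prop := out = subsetSum_alt lst n
instance (lst : List Int) (n : Int) (out : Bool) : Decidable (Spec_subsetSum lst n out) := by unfold Spec_subsetSum; infer_instance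

-- ===== CLAIM (what is proved, stated in full; the proofs are below) =====
def Claim_equal_subsetSum : Prop := ∀ (lst : List Int) (n : Int), Dom_subsetSum lst n → Spec_subsetSum lst n (subsetSum lst n)

-- ===== LEMMAS AND PROOFS =====

-- A returns true exactly when three (not necessarily distinct) elements of lst sum to n
theorem subsetSum_true_iff (lst : List Int) (n : Int) :
    subsetSum lst n = true ↔ ∃ a ∈ lst, ∃ b ∈ lst, ∃ c ∈ lst, a + b + c = n := by
  simp only [subsetSum, List.any_eq_true, PySem.List.mem_pyRange_one, beq_iff_eq]
  constructor
  · rintro ⟨i, ⟨hi0, hi⟩, j, ⟨hj0, hj⟩, k, ⟨hk0, hk⟩, h⟩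
    rw [PySem.List.pyGetD_eq_getElem lst 0 hi0 (by exact_mod_cast hi),
        PySem.List.pyGetD_eq_getElem lst 0 hj0 (by exact_mod_cast hj),
        PySem.List.pyGetD_eq_getElem lst 0 hk0 (by exact_mod_cast hk)] at h
    exact ⟨_, List.getElem_mem _, _, List.getElem_mem _, _, List.getElem_mem _, h⟩
  · rintro ⟨a, ha, b, hb, c, hc, h⟩
    obtain ⟨i, hi, ha'⟩ := List.getElem_of_mem ha
    obtain ⟨j, hj, hb'⟩ := List.getElem_of_mem hb
    obtain ⟨k, hk, hc'⟩ := List.getElem_of_mem hc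
    refine ⟨i, ⟨Int.natCast_nonneg _, by exact_mod_cast hi⟩,
            j, ⟨Int.natCast_nonneg _, by exact_mod_cast hj⟩,
            k, ⟨Int.natCast_nonneg _, by exact_mod_cast hk⟩, ?_⟩
    rw [PySem.List.pyGetD_eq_getElem lst 0 (Int.natCast_nonneg _) (by exact_mod_cast hi),
        PySem.List.pyGetD_eq_getElem lst 0 (Int.natCast_nonneg _) (by exact_mod_cast hj),
        PySem.List.pyGetD_eq_getElem lst 0 (Int.natCast_nonneg _) (by exact_mod_cast hk)]
    simpa [Int.toNat_natCast, ha', hb', hc'] using h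

-- B returns true under the same characterisation
theorem subsetSum_alt_true_iff (lst : List Int) (n : Int) :
    subsetSum_alt lst n = true ↔ ∃ a ∈ lst, ∃ b ∈ lst, ∃ c ∈ lst, a + b + c = n := by
  simp only [subsetSum_alt, List.any_eq_true, PySem.Set.contains, List.contains_iff_mem,
    PySem.Set.mem_ofList, List.mem_flatMap, List.mem_map]
  constructor
  · rintro ⟨c, hc, a, ha, b, hb, h⟩
    exact ⟨a, ha, b, hb, c, hc, by omega⟩
  · rintro ⟨a, ha, b, hb, c, hc, h⟩
    exact ⟨c, hc, a, ha, b, hb, by omega⟩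

-- ===== VERDICT (by name: the statement is the Claim_ definition above) =====
theorem subsetSum_spec : Claim_equal_subsetSum := by
  intro lst n _
  unfold Spec_subsetSum
  rcases hb : subsetSum_alt lst n with _ | _
  · rcases ha : subsetSum lst n with _ | _
    · rfl
    · exact absurd ((subsetSum_alt_true_iff lst n).mpr ((subsetSum_true_iff lst n).mp ha))
        (by simp [hb])
  · exact (subsetSum_true_iff lst n).mpr ((subsetSum_alt_true_iff lst n).mp hb)
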